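-- pv_equiv track=rewrite | github.com/oliwkan091/ACV3 | Techniczne/Kopie/1 POPRZEDNIA WERSJA JUŻ NIE UŻYWANA/Wersja 1 nie urzywana/ArticleChecker.py | isLink
-- ===== SOURCE A (Python) =====
-- def isLink(link):
-- 	#Znaki charakterystyczne dla linku
-- 	linkData = '=/\"-'
--
-- 	closerToLink = 0
-- 	for letter in link:
-- 		for sign in linkData:
-- 			if sign == letter:
-- 				closerToLink+=1
-- 			if closerToLink >=3 :
-- 				return True
-- 	return False;
-- ===== SOURCE B (Python) =====
-- def isLink(link):
--     counts = {}
--     for ch in link: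
--         counts[ch] = counts.get(ch, 0) + 1
--     total = 0
--     for c in '=/"-':
--         total += counts.get(c, 0)
--     return total >= 3
-- ===== Notes on version B (the rewrite author's own statement) =====
-- stated objective: idiomatic
-- what changed: Replaced A's per-letter nested scan with a running counter and early exit by two staged passes: build a full character-frequency table of the input, then sum the four target characters' counts and compare to 3.
import Mathlib
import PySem

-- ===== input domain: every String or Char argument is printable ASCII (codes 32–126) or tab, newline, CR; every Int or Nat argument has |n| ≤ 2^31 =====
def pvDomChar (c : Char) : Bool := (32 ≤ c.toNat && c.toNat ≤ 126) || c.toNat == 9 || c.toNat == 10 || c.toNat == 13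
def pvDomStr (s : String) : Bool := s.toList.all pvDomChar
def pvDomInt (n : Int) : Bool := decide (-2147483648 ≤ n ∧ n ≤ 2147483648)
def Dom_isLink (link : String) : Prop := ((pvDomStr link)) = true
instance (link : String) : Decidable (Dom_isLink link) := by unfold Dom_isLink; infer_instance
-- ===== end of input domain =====

-- B replaces A's single scan with running counter and early exit by two staged passes: a full
-- character-frequency table, then a sum of the four target characters' counts compared to 3 (idiomatic).

-- ===== PORT A =====
-- inner loop over the four signs; none = early `return True`, some acc = loop finished with counter acc
def isLinkInner : List Char → Char → Nat → Option Nat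
  | [], _, acc => some acc
  | s :: ss, letter, acc =>
    let acc' := if s == letter then acc + 1 else acc
    if acc' ≥ 3 then none else isLinkInner ss letter acc'

def isLinkLoop : List Char → Nat → Bool
  | [], _ => false
  | c :: rest, acc =>
    match isLinkInner ['=', '/', '"', '-'] c acc with
    | none => true
    | some acc' => isLinkLoop rest acc'

def isLink (link : String) : Bool := isLinkLoop link.toList 0

-- ===== PORT B =====
-- counts[ch] = counts.get(ch,0)+1 over the whole string = PySem.Dict.counter (collections-style frequency table)
def isLink_alt (link : String) : Bool :=
  let counts : PySem.Dict Char Int := PySem.Dict.counter link.toList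
  let total : Int := ['=', '/', '"', '-'].foldl (fun s c => s + counts.getD c 0) 0
  decide (3 ≤ total)

-- ===== PRECONDITION & SPEC =====
def Spec_isLink (link : String) (out : Bool) : Prop := out = isLink_alt link
instance (link : String) (out : Bool) : Decidable (Spec_isLink link out) := by unfold Spec_isLink; infer_instance

-- ===== CLAIM (what is proved, stated in full; the proofs are below) =====
def Claim_equal_isLink : Prop := ∀ (link : String), Dom_isLink link → Spec_isLink link (isLink link)

-- ===== LEMMAS AND PROOFS =====
def pvHit (c : Char) : Bool := c == '=' || c == '/' || c == '"' || c == '-'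

theorem isLinkInner_eq (c : Char) (acc : Nat) :
    isLinkInner ['=', '/', '"', '-'] c acc =
      (if acc + (if pvHit c then 1 else 0) ≥ 3 then none
       else some (acc + (if pvHit c then 1 else 0))) := by
  by_cases h1 : '=' == c <;> by_cases h2 : '/' == c <;> by_cases h3 : '"' == c <;>
    by_cases h4 : '-' == c <;>
    simp_all [isLinkInner, pvHit, BEq.comm] <;> omega

theorem isLinkLoop_eq (l : List Char) (acc : Nat) (h : acc < 3) :
    isLinkLoop l acc = decide (3 ≤ acc + l.countP pvHit) := by
  induction l generalizing acc with
  | nil => simp [isLinkLoop]; omega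
  | cons c rest ih =>
    rw [isLinkLoop, isLinkInner_eq, List.countP_cons]
    by_cases hc : pvHit c
    · by_cases h3 : 3 ≤ acc + 1
      · simp [hc, h3]; omega
      · simp only [hc, if_true, ge_iff_le, if_neg h3]
        show isLinkLoop rest (acc + 1) = _
        rw [ih (acc + 1) (by omega)]
        simp; omega
    · simp only [hc, Bool.false_eq_true, if_false, Nat.add_zero, ge_iff_le]
      rw [if_neg (by omega)]
      show isLinkLoop rest acc = _
      rw [ih acc h]

theorem countP_hit_eq (l : List Char) :
    l.countP pvHit = l.count '=' + l.count '/' + l.count '"' + l.count '-' := by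
  induction l with
  | nil => simp
  | cons c rest ih =>
    rw [List.countP_cons]
    simp only [List.count_cons, ih]
    by_cases h1 : c = '=' <;> by_cases h2 : c = '/' <;> by_cases h3 : c = '"' <;>
      by_cases h4 : c = '-' <;> simp_all [pvHit] <;> omega

-- ===== VERDICT (by name: the statement is the Claim_ definition above) =====
theorem isLink_spec : Claim_equal_isLink := by
  intro link _
  unfold Spec_isLink isLink isLink_alt
  rw [isLinkLoop_eq link.toList 0 (by omega)]
  simp only [List.foldl, PySem.Dict.getD_counter, countP_hit_eq, Nat.zero_add]
  rw [decide_eq_decide]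
  omega
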